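-- pv_equiv track=rewrite | github.com/Carlos-Jr/thermalbits | thermalbits/verilog_utils.py | _top_level_binary_ops
-- ===== SOURCE A (Python) =====
-- from collections.abc import Iterable, Sequence
--
-- def _top_level_binary_ops(tokens: Sequence[str]) -> list[str]:
--     ops: list[str] = []
--     depth = 0
--     for token in tokens:
--         if token == "(":
--             depth += 1
--         elif token == ")":
--             depth -= 1
--             if depth < 0:
--                 raise ValueError("Invalid expression syntax: unbalanced parentheses")
--         elif depth == 0 and token in ("&", "|"):
--             ops.append(token)
--
--     if depth != 0:
--         raise ValueError("Invalid expression syntax: unbalanced parentheses")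
--     return ops
-- ===== SOURCE B (Python) =====
-- from collections.abc import Iterable, Sequence
-- from itertools import accumulate
--
-- def _top_level_binary_ops(tokens: Sequence[str]) -> list[str]:
--     deltas = [1 if t == "(" else -1 if t == ")" else 0 for t in tokens]
--     depths = list(accumulate(deltas, initial=0))  # depths[i] = depth BEFORE token i
--     if any(d < 0 for d in depths) or depths[-1] != 0:
--         raise ValueError("Invalid expression syntax: unbalanced parentheses")
--     return [t for t, d in zip(tokens, depths) if d == 0 and t in ("&", "|")]
-- ===== Notes on version B (the rewrite author's own statement) =====
-- stated objective: alternative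
-- what changed: Replaces A's single stateful loop (running depth counter with in-loop raise and append) by a table-then-filter decomposition: map tokens to depth deltas, build the prefix-depth table with itertools.accumulate, validate it in one check, then filter tokens by their before-token depth via zip.
import Mathlib
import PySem

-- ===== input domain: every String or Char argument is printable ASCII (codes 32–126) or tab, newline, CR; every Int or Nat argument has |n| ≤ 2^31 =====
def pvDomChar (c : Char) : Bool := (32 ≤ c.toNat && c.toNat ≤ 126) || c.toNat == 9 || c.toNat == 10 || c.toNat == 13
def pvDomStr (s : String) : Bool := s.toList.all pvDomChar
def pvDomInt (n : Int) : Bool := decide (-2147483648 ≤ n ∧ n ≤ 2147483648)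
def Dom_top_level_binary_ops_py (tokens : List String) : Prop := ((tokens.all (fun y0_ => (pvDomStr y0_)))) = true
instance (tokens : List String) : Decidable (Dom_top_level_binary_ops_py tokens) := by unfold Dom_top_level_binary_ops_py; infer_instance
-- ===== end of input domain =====

-- B replaces A's stateful loop by an accumulate-table + filter decomposition (objective: alternative);
-- Pre_ excludes unbalanced-parenthesis inputs, on which both Pythons raise ValueError.


-- ===== PORT A =====
-- A's loop state: none = ValueError already raised, some (ops, depth) otherwise.
def tlA_step (s : Option (List String × Int)) (token : String) : Option (List String × Int) :=
  match s with
  | none => none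
  | some (ops, depth) =>
    if token = "(" then some (ops, depth + 1)
    else if token = ")" then
      (if depth - 1 < 0 then none else some (ops, depth - 1))
    else if depth = 0 ∧ (token = "&" ∨ token = "|") then some (ops ++ [token], depth)
    else some (ops, depth)

def top_level_binary_ops_py (tokens : List String) : List String :=
  match tokens.foldl tlA_step (some ([], 0)) with
  | none => []                                   -- ValueError (excluded by Pre_)
  | some (ops, depth) => if depth ≠ 0 then [] else ops   -- ¬depth=0: ValueError (excluded by Pre_)

-- ===== PORT B =====
def tlB_delta (t : String) : Int := if t = "(" then 1 else if t = ")" then -1 else 0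

def top_level_binary_ops_py_alt (tokens : List String) : List String :=
  let deltas := tokens.map tlB_delta
  let depths := List.scanl (· + ·) 0 deltas      -- accumulate(deltas, initial=0): depth BEFORE each token
  if depths.any (fun d => decide (d < 0)) || !(depths.getLast? == some 0) then []  -- ValueError (excluded by Pre_)
  else ((tokens.zip depths).filter
          (fun p => decide (p.2 = 0) && (p.1 == "&" || p.1 == "|"))).map Prod.fst

-- ===== PRECONDITION & SPEC =====
-- Pre_ excludes exactly the unbalanced-parenthesis token lists, on which A raises ValueError
-- (a prefix with more ")" than "(", or unequal totals); B raises ValueError there too.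
def Pre_top_level_binary_ops_py (tokens : List String) : Prop :=
  (∀ i ≤ tokens.length, (tokens.take i).count ")" ≤ (tokens.take i).count "(") ∧
  tokens.count "(" = tokens.count ")"
instance (tokens : List String) : Decidable (Pre_top_level_binary_ops_py tokens) := by
  unfold Pre_top_level_binary_ops_py; infer_instance

def pvWitness_top_level_binary_ops_py : List String :=
  (["a", "&", "(", "b", "|", "c", ")", "|", "d"])

def Spec_top_level_binary_ops_py (tokens : List String) (out : List String) : Prop := out = top_level_binary_ops_py_alt tokens
instance (tokens : List String) (out : List String) : Decidable (Spec_top_level_binary_ops_py tokens out) := by unfold Spec_top_level_binary_ops_py; infer_instance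

-- ===== CLAIM (what is proved, stated in full; the proofs are below) =====
def Claim_equal_top_level_binary_ops_py : Prop := ∀ (tokens : List String), Dom_top_level_binary_ops_py tokens → Pre_top_level_binary_ops_py tokens → Spec_top_level_binary_ops_py tokens (top_level_binary_ops_py tokens)

-- ===== LEMMAS AND PROOFS =====

-- signed sum of deltas of a list
def tlSum (l : List String) : Int := (l.map tlB_delta).sum

lemma tlSum_nil : tlSum [] = 0 := rfl

lemma tlSum_cons (t : String) (l : List String) : tlSum (t :: l) = tlB_delta t + tlSum l := by
  simp [tlSum]

-- delta sum = count "(" - count ")"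
lemma tlSum_eq_counts (l : List String) : tlSum l = (l.count "(" : Int) - l.count ")" := by
  induction l with
  | nil => simp [tlSum]
  | cons t l ih =>
      rw [tlSum_cons, ih]
      by_cases h1 : t = "("
      · simp [tlB_delta, h1]; ring
      · by_cases h2 : t = ")"
        · simp [tlB_delta, h1, h2]; ring
        · simp [tlB_delta, h1, h2]

-- prefix-nonnegativity condition relative to a start depth d
def tlOk (d : Int) (l : List String) : Prop := ∀ i ≤ l.length, 0 ≤ d + tlSum (l.take i)

lemma tlOk_cons {d : Int} {t : String} {l : List String} (h : tlOk d (t :: l)) :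
    tlOk (d + tlB_delta t) l := by
  intro i hi
  have := h (i + 1) (by simpa using Nat.succ_le_succ hi)
  simpa [tlSum_cons, add_assoc] using this

-- B's filter predicate
def tlPred (p : String × Int) : Bool := decide (p.2 = 0) && (p.1 == "&" || p.1 == "|")

-- the filtered list of B, started at depth d
def tlFilt (d : Int) (l : List String) : List String :=
  ((l.zip (List.scanl (· + ·) d (l.map tlB_delta))).filter tlPred).map Prod.fst

lemma tlFilt_nil (d : Int) : tlFilt d [] = [] := rfl

lemma tlFilt_cons (d : Int) (t : String) (l : List String) :
    tlFilt d (t :: l) =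
      (if tlPred (t, d) then [t] else []) ++ tlFilt (d + tlB_delta t) l := by
  by_cases h : tlPred (t, d) <;>
    simp [tlFilt, List.scanl_cons, List.filter_cons, h]

-- main invariant: A's fold from a live state equals ops ++ B's filtered list, with the final depth
lemma foldA_eq (tokens : List String) : ∀ (ops : List String) (d : Int),
    0 ≤ d → tlOk d tokens →
    tokens.foldl tlA_step (some (ops, d)) = some (ops ++ tlFilt d tokens, d + tlSum tokens) := by
  induction tokens with
  | nil => intro ops d _ _; simp [tlFilt_nil, tlSum]
  | cons t l ih =>
      intro ops d hd hok
      have hok' : tlOk (d + tlB_delta t) l := tlOk_cons hok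
      by_cases h1 : t = "("
      · subst h1
        have hd' : (0:Int) ≤ d + 1 := by omega
        have hrec := ih ops (d + 1) hd' (by simpa [tlB_delta] using hok')
        have hp : tlPred ("(", d) = false := by simp [tlPred]
        have hstep : ("(" :: l).foldl tlA_step (some (ops, d)) = l.foldl tlA_step (some (ops, d + 1)) := by
          simp [tlA_step]
        rw [hstep, hrec, tlFilt_cons]
        simp [hp, tlB_delta, tlSum_cons, add_assoc]
      · by_cases h2 : t = ")"
        · subst h2
          have hnn : 0 ≤ d + tlSum ((")" :: l).take 1) := hok 1 (by simp)
          have hdm : 0 ≤ d - 1 := by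
            simp [tlSum_cons, tlB_delta, tlSum_nil] at hnn
            omega
          have hnotlt : ¬ (d - 1 < 0) := by omega
          have hδ : tlB_delta ")" = -1 := by simp [tlB_delta]
          have hrec := ih ops (d - 1) hdm (by simpa [hδ, sub_eq_add_neg] using hok')
          have hp : tlPred (")", d) = false := by simp [tlPred]
          have hstep : (")" :: l).foldl tlA_step (some (ops, d)) = l.foldl tlA_step (some (ops, d - 1)) := by
            simp [tlA_step, hnotlt]
          rw [hstep, hrec, tlFilt_cons]
          simp [hp, hδ, tlSum_cons, sub_eq_add_neg, add_assoc]
        · have hδ : tlB_delta t = 0 := by simp [tlB_delta, h1, h2]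
          by_cases h3 : d = 0 ∧ (t = "&" ∨ t = "|")
          · have hrec := ih (ops ++ [t]) d hd (by simpa [hδ] using hok')
            have hp : tlPred (t, d) = true := by
              rcases h3 with ⟨hd0, hop⟩
              rcases hop with h | h <;> simp [tlPred, hd0, h]
            have hstep : (t :: l).foldl tlA_step (some (ops, d)) = l.foldl tlA_step (some (ops ++ [t], d)) := by
              simp [tlA_step, h1, h2, h3]
            rw [hstep, hrec, tlFilt_cons]
            simp [hp, hδ, tlSum_cons, List.append_assoc]
          · have hrec := ih ops d hd (by simpa [hδ] using hok')
            have hp : tlPred (t, d) = false := by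
              simp only [tlPred, Bool.and_eq_false_iff]
              by_cases hd0 : d = 0
              · right
                have hop : ¬ (t = "&" ∨ t = "|") := fun h => h3 ⟨hd0, h⟩
                push_neg at hop
                simp [hop.1, hop.2]
              · left; simp [hd0]
            have hstep : (t :: l).foldl tlA_step (some (ops, d)) = l.foldl tlA_step (some (ops, d)) := by
              simp [tlA_step, h1, h2, h3]
            rw [hstep, hrec, tlFilt_cons]
            simp [hp, hδ, tlSum_cons]

-- every entry of the scanl depth table is 0 ≤ ·, under tlOk
lemma scanl_nonneg (l : List String) : ∀ (d : Int), 0 ≤ d → tlOk d l →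
    ∀ x ∈ List.scanl (· + ·) d (l.map tlB_delta), 0 ≤ x := by
  induction l with
  | nil => intro d hd _ x hx; simp [List.scanl_nil] at hx; omega
  | cons t l ih =>
      intro d hd hok x hx
      simp only [List.map_cons, List.scanl_cons, List.mem_cons] at hx
      rcases hx with hx | hx
      · omega
      · have h1 : 0 ≤ d + tlSum ((t :: l).take 1) := hok 1 (by simp)
        have hd' : 0 ≤ d + tlB_delta t := by
          simp [tlSum_cons, tlSum_nil] at h1; omega
        exact ih (d + tlB_delta t) hd' (tlOk_cons hok) x hx

-- the last entry of the scanl depth table is the total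
lemma scanl_getLast (l : List String) : ∀ (d : Int),
    (List.scanl (· + ·) d (l.map tlB_delta)).getLast? = some (d + tlSum l) := by
  induction l with
  | nil => intro d; simp [List.scanl_nil, tlSum]
  | cons t l ih =>
      intro d
      simp only [List.map_cons, List.scanl_cons]
      rw [List.getLast?_cons, ih (d + tlB_delta t)]
      simp [tlSum_cons, add_assoc]

-- ===== VERDICT (by name: the statement is the Claim_ definition above) =====
theorem top_level_binary_ops_py_spec : Claim_equal_top_level_binary_ops_py := by
  intro tokens _ hpre
  obtain ⟨hpref, htot⟩ := hpre
  have hok : tlOk 0 tokens := by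
    intro i hi
    have := hpref i hi
    have hc := tlSum_eq_counts (tokens.take i)
    omega
  have hsum0 : tlSum tokens = 0 := by
    have hc := tlSum_eq_counts tokens
    omega
  have hA := foldA_eq tokens [] 0 le_rfl hok
  unfold Spec_top_level_binary_ops_py
  unfold top_level_binary_ops_py top_level_binary_ops_py_alt
  rw [hA]
  have hany : (List.scanl (· + ·) 0 (tokens.map tlB_delta)).any (fun d => decide (d < 0)) = false := by
    rw [List.any_eq_false]
    intro x hx
    have := scanl_nonneg tokens 0 le_rfl hok x hx
    simp; omega
  have hlast : (List.scanl (· + ·) 0 (tokens.map tlB_delta)).getLast? = some 0 := by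
    rw [scanl_getLast tokens 0]; simp [hsum0]
  simp only [hany, hlast, hsum0]
  simp only [tlFilt, List.nil_append, add_zero]
  rfl
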